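-- pv_equiv track=rewrite | github.com/fernandacaron/pynnotate | mapaminonuc.py | map_amino_to_nuc_no_alignment
-- ===== SOURCE A (Python) =====
-- def map_amino_to_nuc_no_alignment(nt_seq, aa_seq):
--     codon_map = []
--     nt_pos = 0
--
--     for aa in aa_seq:
--         ## ignoring gaps
--         if aa != "-":
--             codon = str(nt_seq[nt_pos:nt_pos + 3])
--             codon_map.append(codon)
--             nt_pos += 3
--     return "".join(codon_map)
-- ===== SOURCE B (Python) =====
-- def map_amino_to_nuc_no_alignment(nt_seq, aa_seq):
--     count = sum(aa != "-" for aa in aa_seq)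
--     return "".join(str(nt_seq[3 * k:3 * k + 3]) for k in range(count))
-- ===== Notes on version B (the rewrite author's own statement) =====
-- stated objective: alternative
-- what changed: Replaces the interleaved filter-and-advance loop (position accumulator advanced inside a conditional) by a counting pass over aa_seq followed by a numeric-range traversal slicing nt_seq directly at computed offsets.
import Mathlib
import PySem

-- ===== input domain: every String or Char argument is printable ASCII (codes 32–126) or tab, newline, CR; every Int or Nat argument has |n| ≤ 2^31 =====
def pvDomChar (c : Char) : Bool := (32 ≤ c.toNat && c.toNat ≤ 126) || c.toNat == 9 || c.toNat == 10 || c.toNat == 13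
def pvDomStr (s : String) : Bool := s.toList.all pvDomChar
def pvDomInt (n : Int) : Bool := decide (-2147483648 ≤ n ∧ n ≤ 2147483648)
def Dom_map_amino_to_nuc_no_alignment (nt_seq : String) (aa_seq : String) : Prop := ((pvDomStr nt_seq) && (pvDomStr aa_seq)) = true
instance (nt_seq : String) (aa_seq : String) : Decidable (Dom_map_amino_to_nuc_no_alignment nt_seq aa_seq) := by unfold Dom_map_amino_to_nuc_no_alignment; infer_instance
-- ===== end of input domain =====

-- B replaces A's filter-and-advance loop by a counting pass plus a range traversal; alternative decomposition, same cost.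

-- ===== PORT A =====
def map_amino_to_nuc_no_alignment (nt_seq : String) (aa_seq : String) : String :=
  let st := aa_seq.toList.foldl
    (fun (st : List String × Int) aa =>
      if aa ≠ '-' then
        (st.1 ++ [PySem.Str.slice nt_seq (some st.2) (some (st.2 + 3))], st.2 + 3)
      else st)
    ([], 0)
  PySem.Str.join "" st.1

-- ===== PORT B =====
def map_amino_to_nuc_no_alignment_alt (nt_seq : String) (aa_seq : String) : String :=
  let count : Int := (aa_seq.toList.map (fun aa => if aa ≠ '-' then (1 : Int) else 0)).sum
  PySem.Str.join "" ((PySem.List.pyRange 0 count 1).map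
    (fun k => PySem.Str.slice nt_seq (some (3 * k)) (some (3 * k + 3))))

-- ===== PRECONDITION & SPEC =====
def Spec_map_amino_to_nuc_no_alignment (nt_seq : String) (aa_seq : String) (out : String) : Prop := out = map_amino_to_nuc_no_alignment_alt nt_seq aa_seq
instance (nt_seq : String) (aa_seq : String) (out : String) : Decidable (Spec_map_amino_to_nuc_no_alignment nt_seq aa_seq out) := by unfold Spec_map_amino_to_nuc_no_alignment; infer_instance

-- ===== CLAIM (what is proved, stated in full; the proofs are below) =====
def Claim_equal_map_amino_to_nuc_no_alignment : Prop := ∀ (nt_seq : String) (aa_seq : String), Dom_map_amino_to_nuc_no_alignment nt_seq aa_seq → Spec_map_amino_to_nuc_no_alignment nt_seq aa_seq (map_amino_to_nuc_no_alignment nt_seq aa_seq)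

-- ===== LEMMAS AND PROOFS =====

-- A's loop, started at accumulator `acc` and position `p`, appends one slice per
-- non-gap character, at positions p, p+3, p+6, …
theorem foldlA_eq (nt : String) (l : List Char) (acc : List String) (p : Int) :
    l.foldl
      (fun (st : List String × Int) aa =>
        if aa ≠ '-' then
          (st.1 ++ [PySem.Str.slice nt (some st.2) (some (st.2 + 3))], st.2 + 3)
        else st)
      (acc, p)
    = (acc ++ (List.range (l.countP (· ≠ '-'))).map
        (fun (k : Nat) => PySem.Str.slice nt (some (p + 3 * (k : Int))) (some (p + 3 * (k : Int) + 3))),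
       p + 3 * (l.countP (· ≠ '-') : Int)) := by
  induction l generalizing acc p with
  | nil => simp
  | cons c t ih =>
    rw [List.foldl_cons]
    by_cases hc : c = '-'
    · rw [if_neg (by simp [hc]), ih]
      have hcnt : (c :: t).countP (· ≠ '-') = t.countP (· ≠ '-') := by
        simp [hc]
      rw [hcnt]
    · rw [if_pos (by simpa using hc), ih]
      have hcnt : (c :: t).countP (· ≠ '-') = t.countP (· ≠ '-') + 1 := by
        simp [hc]
      rw [hcnt, List.range_succ_eq_map, List.map_cons, List.map_map]
      refine Prod.ext ?_ ?_
      · show acc ++ [_] ++ _ = acc ++ (_ :: _)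
        rw [List.append_assoc, List.singleton_append]
        refine congrArg (acc ++ ·) (congrArg₂ (· :: ·) ?_ ?_)
        · norm_num
        · refine List.map_congr_left (fun k _ => ?_)
          show PySem.Str.slice nt _ _ = PySem.Str.slice nt _ _
          congr 2 <;> push_cast <;> ring
      · show p + 3 + 3 * ((t.countP (· ≠ '-') : Int)) = _
        push_cast
        ring

-- B's count (sum of 0/1 indicators) is the countP of non-gap characters.
theorem sum_ind_eq_countP (l : List Char) :
    (l.map (fun aa => if aa ≠ '-' then (1 : Int) else 0)).sum
      = (l.countP (· ≠ '-') : Int) := by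
  induction l with
  | nil => simp
  | cons c t ih =>
    rw [List.map_cons, List.sum_cons, List.countP_cons, ih]
    by_cases hc : c = '-' <;> simp [hc] <;> ring

-- ===== VERDICT (by name: the statement is the Claim_ definition above) =====
theorem map_amino_to_nuc_no_alignment_spec : Claim_equal_map_amino_to_nuc_no_alignment := by
  intro nt aa _
  show map_amino_to_nuc_no_alignment nt aa = map_amino_to_nuc_no_alignment_alt nt aa
  simp only [map_amino_to_nuc_no_alignment, map_amino_to_nuc_no_alignment_alt]
  rw [foldlA_eq, sum_ind_eq_countP, PySem.List.pyRange_one, List.map_map,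
    List.nil_append]
  refine congrArg (PySem.Str.join "") (List.map_congr_left (fun k _ => ?_))
  show PySem.Str.slice nt _ _ = PySem.Str.slice nt _ _
  congr 2 <;> push_cast <;> ring
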